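-- pv_equiv track=rewrite | github.com/mohammadameenbarech/Boltdown | downloader/services.py | _extract_hash_from_magnet
-- ===== SOURCE A (Python) =====
-- def _extract_hash_from_magnet(magnet_link):
--     try:
--         parts = magnet_link.split('&')
--         for part in parts:
--             if 'xt=urn:btih:' in part:
--                 return part.split('xt=urn:btih:')[1].split('&')[0].lower()
--     except:
--         pass
--     return None
-- ===== SOURCE B (Python) =====
-- def _extract_hash_from_magnet(magnet_link):
--     marker = 'xt=urn:btih:'
--     start = magnet_link.find(marker)
--     if start == -1:
--         return None
--     start += len(marker)
--     end = magnet_link.find('&', start)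
--     if end == -1:
--         end = len(magnet_link)
--     return magnet_link[start:end].lower()
-- ===== Notes on version B (the rewrite author's own statement) =====
-- stated objective: idiomatic
-- what changed: B replaces A's split('&') into parts, the loop over the parts and the two nested split calls by two str.find calls (first marker occurrence, next '&') and one slice.
-- intended difference: On malformed links where 'xt=urn:btih:' occurs again between the first marker and the next '&', A truncates the returned hash at that second marker (an artefact of split('xt=urn:btih:')[1]) while B returns the whole field up to the '&', the plain reading of the URI parameter. — e.g. on _extract_hash_from_magnet("xt=urn:btih:Axt=urn:btih:B&c"): A returns some "a", B returns some "axt=urn:btih:b"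
import Mathlib
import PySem

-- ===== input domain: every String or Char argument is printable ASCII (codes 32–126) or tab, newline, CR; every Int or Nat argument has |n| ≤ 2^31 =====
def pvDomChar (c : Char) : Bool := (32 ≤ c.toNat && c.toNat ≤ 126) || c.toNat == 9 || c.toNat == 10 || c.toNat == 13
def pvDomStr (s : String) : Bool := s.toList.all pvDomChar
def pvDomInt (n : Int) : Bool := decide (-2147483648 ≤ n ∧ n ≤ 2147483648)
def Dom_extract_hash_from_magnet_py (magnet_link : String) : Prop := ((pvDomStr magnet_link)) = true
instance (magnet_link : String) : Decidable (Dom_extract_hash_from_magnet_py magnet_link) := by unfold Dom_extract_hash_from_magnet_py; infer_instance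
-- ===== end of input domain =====

-- B replaces A's split('&')/loop/nested-splits with two str.find calls and one slice (objective:
-- idiomatic); on malformed links with a second 'xt=urn:btih:' inside the hash field the two differ
-- (see D_ below), elsewhere the return values are proved equal.

-- ===== PORT A =====
-- Python A: parts = magnet_link.split('&'); for part in parts: if 'xt=urn:btih:' in part:
--   return part.split('xt=urn:btih:')[1].split('&')[0].lower();  return None (any exception → None).
-- The loop over parts (char-list level; the 'none' arms of the matches are the IndexError /
-- empty-separator paths, which Python's bare 'except' turns into None).
def pvAGo : List (List Char) → Option (List Char)
  | [] => none
  | part :: rest =>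
    if PySem.Chars.isIn "xt=urn:btih:".toList part then
      match PySem.Chars.split? part "xt=urn:btih:".toList with
      | none => none
      | some pieces =>
        match PySem.List.pyGet? pieces 1 with
        | none => none                                   -- IndexError → except → None
        | some x =>
          match PySem.Chars.split? x "&".toList with
          | none => none
          | some pieces2 =>
            match PySem.List.pyGet? pieces2 0 with
            | none => none
            | some y => some (PySem.Chars.lower y)
    else pvAGo rest

def extract_hash_from_magnet_py (magnet_link : String) : Option String :=
  match PySem.Chars.split? magnet_link.toList "&".toList with
  | none => none
  | some parts => (pvAGo parts).map String.ofList

-- ===== PORT B =====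
-- Python B (Source B): start = magnet_link.find('xt=urn:btih:'); if start == -1: return None;
-- start += 12; end = magnet_link.find('&', start); if end == -1: end = len(magnet_link);
-- return magnet_link[start:end].lower().
def extract_hash_from_magnet_py_alt (magnet_link : String) : Option String :=
  let s := magnet_link.toList
  let start0 := PySem.Chars.find s "xt=urn:btih:".toList
  if start0 = -1 then none
  else
    let start := start0 + ("xt=urn:btih:".toList.length : Int)
    let end0 := PySem.Chars.findFrom s ['&'] start none
    let e := if end0 = -1 then (s.length : Int) else end0
    some (String.ofList (PySem.Chars.lower (PySem.List.slice s (some start) (some e))))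

-- ===== PRECONDITION & SPEC =====
-- On malformed links where 'xt=urn:btih:' occurs again between the first marker and the next '&',
-- A truncates the returned hash at that second marker (an artefact of split('xt=urn:btih:')[1])
-- while B returns the whole field up to the '&', the plain reading of the URI parameter.
def D_extract_hash_from_magnet_py (magnet_link : String) : Prop :=
  PySem.Chars.isIn "xt=urn:btih:".toList magnet_link.toList = true ∧
  PySem.Chars.isIn "xt=urn:btih:".toList
    ((magnet_link.toList.drop
      ((PySem.Chars.find magnet_link.toList "xt=urn:btih:".toList).toNat + 12)).takeWhile (· ≠ '&')) = true
instance (magnet_link : String) : Decidable (D_extract_hash_from_magnet_py magnet_link) := by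
  unfold D_extract_hash_from_magnet_py; infer_instance

def Spec_extract_hash_from_magnet_py (magnet_link : String) (out : Option String) : Prop :=
  ¬ D_extract_hash_from_magnet_py magnet_link → out = extract_hash_from_magnet_py_alt magnet_link
instance (magnet_link : String) (out : Option String) : Decidable (Spec_extract_hash_from_magnet_py magnet_link out) := by
  unfold Spec_extract_hash_from_magnet_py; infer_instance

def pvDiffWitness_extract_hash_from_magnet_py : String := "xt=urn:btih:Axt=urn:btih:B&c"
def pvDiffWitnessOut_extract_hash_from_magnet_py : (Option String) × (Option String) :=
  (some "a", some "axt=urn:btih:b")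

-- ===== CLAIM (what is proved, stated in full; the proofs are below) =====
def Claim_unchanged_extract_hash_from_magnet_py : Prop := ∀ (magnet_link : String), Dom_extract_hash_from_magnet_py magnet_link → Spec_extract_hash_from_magnet_py magnet_link (extract_hash_from_magnet_py magnet_link)
def Claim_changed_extract_hash_from_magnet_py : Prop := Dom_extract_hash_from_magnet_py (pvDiffWitness_extract_hash_from_magnet_py) ∧ D_extract_hash_from_magnet_py (pvDiffWitness_extract_hash_from_magnet_py) ∧ extract_hash_from_magnet_py (pvDiffWitness_extract_hash_from_magnet_py) = pvDiffWitnessOut_extract_hash_from_magnet_py.1 ∧ extract_hash_from_magnet_py_alt (pvDiffWitness_extract_hash_from_magnet_py) = pvDiffWitnessOut_extract_hash_from_magnet_py.2 ∧ pvDiffWitnessOut_extract_hash_from_magnet_py.1 ≠ pvDiffWitnessOut_extract_hash_from_magnet_py.2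
def Claim_exact_extract_hash_from_magnet_py : Prop := ∀ (magnet_link : String), Dom_extract_hash_from_magnet_py magnet_link → D_extract_hash_from_magnet_py magnet_link → extract_hash_from_magnet_py magnet_link ≠ extract_hash_from_magnet_py_alt magnet_link

-- ===== LEMMAS AND PROOFS =====

def pvMark : List Char := ['x','t','=','u','r','n',':','b','t','i','h',':']

-- the hash field of a link: the characters after the first marker, up to the next '&' or the end
def pvHashField : List Char → Option (List Char)
  | [] => none
  | c :: cs =>
    if pvMark.isPrefixOf (c :: cs) then some ((List.drop 12 (c :: cs)).takeWhile (· ≠ '&'))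
    else pvHashField cs


def pvMagnet : List Char := "xt=urn:btih:".toList

-- A's capture on one part, as a scan: collect chars until '&', a second marker, or the end
def pvBCapture : List Char → List Char
  | [] => []
  | c :: cs =>
    if c = '&' || PySem.Chars.startswith (c :: cs) pvMagnet then []
    else c :: pvBCapture cs

-- A as a single scan over the characters (suffix recursion)
def pvBScan : List Char → Option (List Char)
  | [] => none
  | c :: cs =>
    if PySem.Chars.startswith (c :: cs) pvMagnet then
      some (PySem.Chars.lower (pvBCapture (List.drop pvMagnet.length (c :: cs))))
    else pvBScan cs

def pvSplitCore (sep : List Char) : List Char → List (List Char)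
  | [] => [[]]
  | c :: rest =>
    if h : sep ≠ [] ∧ sep.isPrefixOf (c :: rest) then
      [] :: pvSplitCore sep (List.drop sep.length (c :: rest))
    else
      List.modifyHead (c :: ·) (pvSplitCore sep rest)
termination_by l => l.length
decreasing_by
  · simp only [List.length_drop, List.length_cons]
    have : 1 ≤ sep.length := by
      cases hs : sep with
      | nil => exact absurd hs h.1
      | cons a t => simp
    omega
  · simp

theorem pvSplitCore_ne_nil (sep l : List Char) : pvSplitCore sep l ≠ [] := by
  induction l using pvSplitCore.induct sep with
  | case1 => simp [pvSplitCore]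
  | case2 c rest h ih => simp only [pvSplitCore, dif_pos h]; simp
  | case3 c rest h ih =>
    simp only [pvSplitCore, dif_neg h]
    cases hx : pvSplitCore sep rest with
    | nil => exact absurd hx ih
    | cons a t => simp

theorem pvSplitOn_go_eq (sep : List Char) (hsep : sep ≠ []) :
    ∀ fuel l cur acc, l.length < fuel →
      PySem.Chars.splitOn.go sep fuel l cur acc
        = acc.reverse ++ List.modifyHead (cur.reverse ++ ·) (pvSplitCore sep l) := by
  intro fuel
  induction fuel with
  | zero => intro l cur acc h; omega
  | succ f ih =>
    intro l cur acc h
    cases l with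
    | nil => simp [PySem.Chars.splitOn.go, pvSplitCore]
    | cons c rest =>
      by_cases hp : sep.isPrefixOf (c :: rest)
      · have hlen : 1 ≤ sep.length := by cases sep with | nil => exact absurd rfl hsep | cons a t => simp
        rw [show PySem.Chars.splitOn.go sep (f+1) (c :: rest) cur acc
              = PySem.Chars.splitOn.go sep f (List.drop sep.length (c :: rest)) [] (cur.reverse :: acc) by
            simp [PySem.Chars.splitOn.go, hp]]
        rw [ih _ _ _ (by simp only [List.length_drop, List.length_cons]; simp only [List.length_cons] at h; omega)]
        rw [show pvSplitCore sep (c :: rest) = [] :: pvSplitCore sep (List.drop sep.length (c :: rest)) by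
            rw [pvSplitCore]; rw [dif_pos ⟨hsep, hp⟩]]
        cases pvSplitCore sep (List.drop sep.length (c :: rest)) <;> simp
      · rw [show PySem.Chars.splitOn.go sep (f+1) (c :: rest) cur acc
              = PySem.Chars.splitOn.go sep f rest (c :: cur) acc by
            simp [PySem.Chars.splitOn.go, hp]]
        rw [ih _ _ _ (by simp at h ⊢; omega)]
        rw [show pvSplitCore sep (c :: rest) = List.modifyHead (c :: ·) (pvSplitCore sep rest) by
            rw [pvSplitCore]; rw [dif_neg (by simp [hp])]]
        cases hx : pvSplitCore sep rest with
        | nil => exact absurd hx (pvSplitCore_ne_nil sep rest)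
        | cons a t => simp

theorem pvSplitOn_eq (sep l : List Char) (hsep : sep ≠ []) :
    PySem.Chars.splitOn l sep = pvSplitCore sep l := by
  rw [PySem.Chars.splitOn, pvSplitOn_go_eq sep hsep _ _ _ _ (by omega)]
  cases hx : pvSplitCore sep l with
  | nil => exact absurd hx (pvSplitCore_ne_nil sep l)
  | cons a t => simp

theorem pvAmpPrefix (c : Char) (rest : List Char) :
    (['&'] : List Char).isPrefixOf (c :: rest) = (c == '&') := by
  simp [List.isPrefixOf, BEq.comm]

theorem pvSplitCore_mem (sep l : List Char) :
    ∀ p ∈ pvSplitCore sep l, ∀ a ∈ p, a ∈ l := by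
  induction l using pvSplitCore.induct sep with
  | case1 =>
    intro p hp a ha
    simp [pvSplitCore] at hp; subst hp; simp at ha
  | case2 c rest h ih =>
    intro p hp a ha
    rw [pvSplitCore, dif_pos h] at hp
    rcases List.mem_cons.mp hp with h1 | h1
    · subst h1; simp at ha
    · exact List.mem_of_mem_drop (ih p h1 a ha)
  | case3 c rest h ih =>
    intro p hp a ha
    rw [pvSplitCore, dif_neg h] at hp
    cases hx : pvSplitCore sep rest with
    | nil => exact absurd hx (pvSplitCore_ne_nil sep rest)
    | cons q qs =>
      rw [hx] at hp
      simp only [List.modifyHead] at hp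
      rcases List.mem_cons.mp hp with h1 | h1
      · subst h1
        rcases List.mem_cons.mp ha with h2 | h2
        · simp [h2]
        · exact List.mem_cons_of_mem _ (ih q (by rw [hx]; exact List.mem_cons_self) a h2)
      · exact List.mem_cons_of_mem _ (ih p (by rw [hx]; exact List.mem_cons_of_mem _ h1) a ha)

theorem pvSplitCore_amp_of_not_mem (l : List Char) (h : '&' ∉ l) :
    pvSplitCore ['&'] l = [l] := by
  induction l with
  | nil => simp [pvSplitCore]
  | cons c rest ih =>
    have hc : c ≠ '&' := fun hc => h (by simp [hc])
    rw [pvSplitCore, dif_neg (by rw [pvAmpPrefix]; simp [hc])]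
    rw [ih (fun hm => h (List.mem_cons_of_mem _ hm))]
    simp [List.modifyHead]

theorem pvSplitCore_amp_head (cs p : List Char) (ps : List (List Char))
    (h : pvSplitCore ['&'] cs = p :: ps) :
    '&' ∉ p ∧ ∃ tail, cs = p ++ tail ∧ (tail = [] ∨ ∃ t, tail = '&' :: t) := by
  induction cs generalizing p ps with
  | nil =>
    have h' : ([[]] : List (List Char)) = p :: ps := by simpa [pvSplitCore] using h
    injection h' with h1 h2
    exact ⟨by simp [← h1], [], by simp [← h1], Or.inl rfl⟩
  | cons c rest ih =>
    by_cases hc : c = '&'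
    · subst hc
      rw [pvSplitCore, dif_pos (by rw [pvAmpPrefix]; simp)] at h
      injection h with h1 h2
      exact ⟨by simp [h1.symm], '&' :: rest, by simp [h1.symm], Or.inr ⟨rest, rfl⟩⟩
    · rw [pvSplitCore, dif_neg (by rw [pvAmpPrefix]; simp [hc])] at h
      cases hx : pvSplitCore ['&'] rest with
      | nil => exact absurd hx (pvSplitCore_ne_nil _ rest)
      | cons q qs =>
        rw [hx] at h
        simp only [List.modifyHead] at h
        injection h with h1 h2
        obtain ⟨hq, tail, hrest, hshape⟩ := ih q qs hx
        refine ⟨?_, tail, by simp [h1.symm, hrest], hshape⟩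
        intro hm
        rw [← h1] at hm
        rcases List.mem_cons.mp hm with h3 | h3
        · exact hc h3.symm
        · exact hq h3

theorem pvPrefix_through (m : List Char) (hm : '&' ∉ m) :
    ∀ (u tail : List Char), (tail = [] ∨ ∃ t, tail = '&' :: t) → m <+: u ++ tail → m <+: u := by
  induction m with
  | nil => intro u tail _ _; exact List.nil_prefix
  | cons a m' ihm =>
    intro u tail ht h
    cases u with
    | nil =>
      exfalso
      rcases ht with h0 | ⟨t, h0⟩
      · subst h0; simp at h
      · subst h0
        simp at h
        obtain ⟨ha, _⟩ := h
        exact hm (by simp [ha])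
    | cons b u' =>
      simp only [List.cons_append] at h
      obtain ⟨hab, h2⟩ := (List.cons_prefix_cons).mp h
      have hm' : '&' ∉ m' := fun hx => hm (List.mem_cons_of_mem _ hx)
      exact (List.cons_prefix_cons).mpr ⟨hab, ihm hm' u' tail ht h2⟩

theorem pvMagnet_ne_nil : pvMagnet ≠ [] := by decide
theorem pvAmp_not_mem_magnet : '&' ∉ pvMagnet := by decide

theorem pvBCapture_eq : ∀ (q tail : List Char), '&' ∉ q →
    (tail = [] ∨ ∃ t, tail = '&' :: t) →
    pvBCapture (q ++ tail) = (pvSplitCore pvMagnet q).headI := by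
  intro q
  induction q with
  | nil =>
    intro tail _ ht
    rcases ht with h0 | ⟨t, h0⟩ <;> subst h0 <;> simp [pvBCapture, pvSplitCore]
  | cons d q' ih =>
    intro tail hq ht
    have hd : d ≠ '&' := fun hx => hq (by simp [hx])
    have hq' : '&' ∉ q' := fun hx => hq (List.mem_cons_of_mem _ hx)
    by_cases hpre : pvMagnet <+: d :: q'
    · have hpre2 : pvMagnet <+: (d :: q') ++ tail := hpre.trans (List.prefix_append _ _)
      rw [List.cons_append, pvBCapture,
        if_pos (by
          simp only [PySem.Chars.startswith, Bool.or_eq_true, beq_iff_eq, decide_eq_true_eq]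
          right
          exact List.isPrefixOf_iff_prefix.mpr (by simpa using hpre2))]
      rw [pvSplitCore, dif_pos ⟨pvMagnet_ne_nil, List.isPrefixOf_iff_prefix.mpr hpre⟩]
      simp
    · have hpre2 : ¬ pvMagnet <+: (d :: q') ++ tail := fun hx =>
        hpre (pvPrefix_through pvMagnet pvAmp_not_mem_magnet (d :: q') tail ht hx)
      rw [List.cons_append, pvBCapture,
        if_neg (by
          simp only [PySem.Chars.startswith, Bool.or_eq_true, beq_iff_eq, decide_eq_true_eq]
          push Not
          refine ⟨hd, fun hx => hpre2 ?_⟩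
          simpa using List.isPrefixOf_iff_prefix.mp hx)]
      rw [ih tail hq' ht]
      rw [pvSplitCore, dif_neg (by
        rw [← List.isPrefixOf_iff_prefix] at hpre
        simp [hpre])]
      cases hx : pvSplitCore pvMagnet q' with
      | nil => exact absurd hx (pvSplitCore_ne_nil _ _)
      | cons a t => simp

theorem pvGet?_one {α : Type} (a b : α) (t : List α) : PySem.List.pyGet? (a :: b :: t) 1 = some b := by
  simpa using PySem.List.pyGet?_natCast (a :: b :: t) 1

theorem pvGet?_zero {α : Type} (a : α) (t : List α) : PySem.List.pyGet? (a :: t) 0 = some a := by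
  simpa using PySem.List.pyGet?_natCast (a :: t) 0

theorem pvGet?_one_modifyHead {α : Type} (f : α → α) (l : List α) :
    PySem.List.pyGet? (List.modifyHead f l) 1 = PySem.List.pyGet? l 1 := by
  cases l with
  | nil => rfl
  | cons a t =>
    simp only [List.modifyHead]
    rw [show (1 : Int) = ((1 : Nat) : Int) by norm_num,
      PySem.List.pyGet?_natCast, PySem.List.pyGet?_natCast]
    simp

theorem pvMagnet_eq : pvMagnet = ['x','t','=','u','r','n',':','b','t','i','h',':'] := by decide

theorem pvStartswith_iff (s : List Char) :
    PySem.Chars.startswith s pvMagnet = true ↔ pvMagnet <+: s := by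
  simp [PySem.Chars.startswith, List.isPrefixOf_iff_prefix]

theorem pvLit_eq : "xt=urn:btih:".toList = pvMagnet := rfl

theorem pvSplit?_magnet (part : List Char) :
    PySem.Chars.split? part "xt=urn:btih:".toList = some (pvSplitCore pvMagnet part) := by
  simp only [PySem.Chars.split?, pvLit_eq]
  rw [if_neg (by simp [pvMagnet_eq])]
  rw [pvSplitOn_eq _ _ pvMagnet_ne_nil]

theorem pvSplit?_amp (x : List Char) :
    PySem.Chars.split? x "&".toList = some (pvSplitCore ['&'] x) := by
  simp only [PySem.Chars.split?]
  rw [show "&".toList = ['&'] from rfl, if_neg (by simp)]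
  rw [pvSplitOn_eq _ _ (by simp)]

theorem pvMain (cs : List Char) : pvAGo (pvSplitCore ['&'] cs) = pvBScan cs := by
  induction cs with
  | nil =>
    rw [show pvSplitCore ['&'] [] = [[]] by rw [pvSplitCore]]
    decide
  | cons c rest ih =>
    obtain ⟨p, ps, hx⟩ : ∃ p ps, pvSplitCore ['&'] rest = p :: ps := by
      cases h : pvSplitCore ['&'] rest with
      | nil => exact absurd h (pvSplitCore_ne_nil _ _)
      | cons a t => exact ⟨a, t, rfl⟩
    by_cases hc : c = '&'
    · subst hc
      rw [pvSplitCore, dif_pos ⟨by simp, by rw [pvAmpPrefix]; simp⟩]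
      rw [show pvAGo ([] :: pvSplitCore ['&'] (List.drop (['&'] : List Char).length ('&' :: rest)))
            = pvAGo (pvSplitCore ['&'] (List.drop (['&'] : List Char).length ('&' :: rest))) by
        rw [pvAGo, if_neg (by decide)]]
      have hns : ¬ PySem.Chars.startswith ('&' :: rest) pvMagnet = true := by
        rw [pvStartswith_iff, pvMagnet_eq]
        intro h
        exact absurd (List.cons_prefix_cons.mp h).1 (by decide)
      rw [pvBScan, if_neg hns]
      simpa using ih
    · have hd : pvSplitCore ['&'] (c :: rest) = (c :: p) :: ps := by
        rw [pvSplitCore, dif_neg (by rw [pvAmpPrefix]; simp [hc]), hx]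
        simp [List.modifyHead]
      obtain ⟨hnp, tail, hsplit, hshape⟩ := pvSplitCore_amp_head (c :: rest) (c :: p) ps hd
      rw [hd]
      by_cases hin : PySem.Chars.isIn pvMagnet (c :: p) = true
      · by_cases hpre : pvMagnet <+: (c :: p)
        · -- the marker starts exactly at this position: both sides capture
          have hq : ∀ a ∈ List.drop pvMagnet.length (c :: p), a ∈ (c :: p) :=
            fun a ha => List.mem_of_mem_drop ha
          obtain ⟨x, xs, hy⟩ : ∃ x xs,
              pvSplitCore pvMagnet (List.drop pvMagnet.length (c :: p)) = x :: xs := by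
            cases h : pvSplitCore pvMagnet (List.drop pvMagnet.length (c :: p)) with
            | nil => exact absurd h (pvSplitCore_ne_nil _ _)
            | cons a t => exact ⟨a, t, rfl⟩
          have hxamp : '&' ∉ x := by
            intro hmem
            exact hnp (hq _ (pvSplitCore_mem pvMagnet _ x (by rw [hy]; exact List.mem_cons_self) _ hmem))
          rw [pvAGo, if_pos (by rw [pvLit_eq]; exact hin)]
          rw [pvSplit?_magnet]
          rw [show pvSplitCore pvMagnet (c :: p)
                = [] :: pvSplitCore pvMagnet (List.drop pvMagnet.length (c :: p)) by
              rw [pvSplitCore, dif_pos ⟨pvMagnet_ne_nil, List.isPrefixOf_iff_prefix.mpr hpre⟩]]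
          rw [hy]
          dsimp only
          rw [pvGet?_one]
          dsimp only
          rw [pvSplit?_amp, pvSplitCore_amp_of_not_mem x hxamp]
          dsimp only
          rw [pvGet?_zero]
          -- B side
          have hpre2 : pvMagnet <+: c :: rest := by
            rw [hsplit]; exact hpre.trans (List.prefix_append _ _)
          rw [pvBScan, if_pos (pvStartswith_iff _ |>.mpr hpre2)]
          rw [show List.drop pvMagnet.length (c :: rest)
                = List.drop pvMagnet.length (c :: p) ++ tail by
              rw [hsplit]; exact List.drop_append_of_le_length hpre.length_le]
          rw [pvBCapture_eq _ tail (fun hmem => hnp (hq _ hmem)) hshape, hy]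
          simp
        · -- marker occurs later inside this part
          have hinp : PySem.Chars.isIn pvMagnet p = true := by
            rw [PySem.Chars.isIn_iff_infix]
            rcases List.infix_cons_iff.mp ((PySem.Chars.isIn_iff_infix _ _).mp hin) with h | h
            · exact absurd h hpre
            · exact h
          have hns : ¬ PySem.Chars.startswith (c :: rest) pvMagnet = true := by
            rw [pvStartswith_iff, hsplit]
            intro h
            exact hpre (pvPrefix_through pvMagnet pvAmp_not_mem_magnet _ tail hshape h)
          rw [pvBScan, if_neg hns, ← ih, hx]
          rw [pvAGo, if_pos (by rw [pvLit_eq]; exact hin)]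
          rw [pvAGo, if_pos (by rw [pvLit_eq]; exact hinp)]
          rw [pvSplit?_magnet, pvSplit?_magnet]
          rw [show pvSplitCore pvMagnet (c :: p)
                = List.modifyHead (c :: ·) (pvSplitCore pvMagnet p) by
              rw [pvSplitCore, dif_neg (by
                intro hco
                exact hpre (List.isPrefixOf_iff_prefix.mp hco.2))]]
          dsimp only
          rw [pvGet?_one_modifyHead]
      · -- marker not in this part at all
        have hninp : ¬ PySem.Chars.isIn pvMagnet p = true := by
          rw [PySem.Chars.isIn_iff_infix]
          intro h
          exact hin ((PySem.Chars.isIn_iff_infix _ _).mpr (List.infix_cons_iff.mpr (Or.inr h)))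
        have hnpre : ¬ pvMagnet <+: (c :: p) := fun h =>
          hin ((PySem.Chars.isIn_iff_infix _ _).mpr (List.infix_cons_iff.mpr (Or.inl h)))
        have hns : ¬ PySem.Chars.startswith (c :: rest) pvMagnet = true := by
          rw [pvStartswith_iff, hsplit]
          intro h
          exact hnpre (pvPrefix_through pvMagnet pvAmp_not_mem_magnet _ tail hshape h)
        rw [pvAGo, if_neg (by rw [pvLit_eq]; exact hin)]
        rw [pvBScan, if_neg hns, ← ih, hx]
        rw [pvAGo, if_neg (by rw [pvLit_eq]; exact hninp)]

-- ---- lemmas for the find-based B and the D_ analysis ----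

theorem pvMark_eq : pvMark = pvMagnet := by decide

theorem pvSingletonInfix (a : Char) (l : List Char) : [a] <:+: l ↔ a ∈ l := by
  constructor
  · intro h; exact h.mem (by simp)
  · intro h
    obtain ⟨u, t, rfl⟩ := List.append_of_mem h
    exact ⟨u, t, by simp⟩

-- uniqueness characterisation of Chars.find (first occurrence)
theorem pvFind_eq_of (s sub : List Char) (k : Nat)
    (hk : sub <+: s.drop k) (hmin : ∀ i, i < k → ¬ sub <+: s.drop i) :
    PySem.Chars.find s sub = (k : Int) := by
  have hinf : PySem.Chars.isIn sub s = true :=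
    (PySem.Chars.exists_prefix_drop_iff_isIn sub s).mp ⟨k, hk⟩
  have h0 : 0 ≤ PySem.Chars.find s sub :=
    (PySem.Chars.find_nonneg_iff s sub).mpr ((PySem.Chars.isIn_iff_infix _ _).mp hinf)
  obtain ⟨hpre, hmin'⟩ := PySem.Chars.find_spec h0
  have ht : (PySem.Chars.find s sub).toNat = k := by
    rcases Nat.lt_trichotomy (PySem.Chars.find s sub).toNat k with h | h | h
    · exact absurd hpre (hmin _ h)
    · exact h
    · exact absurd hk (hmin' k h)
  omega

theorem pvFind_cons_of_prefix (c : Char) (cs sub : List Char) (h : sub <+: c :: cs) :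
    PySem.Chars.find (c :: cs) sub = 0 := by
  have := pvFind_eq_of (c :: cs) sub 0 (by simpa using h) (by intro i hi; omega)
  simpa using this

theorem pvFind_cons_neg (c : Char) (cs sub : List Char) (hnp : ¬ sub <+: c :: cs)
    (h : PySem.Chars.find cs sub = -1) : PySem.Chars.find (c :: cs) sub = -1 := by
  rw [PySem.Chars.find_eq_neg_one_iff] at h ⊢
  intro hin
  rcases List.infix_cons_iff.mp hin with h1 | h1
  · exact hnp h1
  · exact h h1

theorem pvFind_cons_succ (c : Char) (cs sub : List Char) (hnp : ¬ sub <+: c :: cs)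
    (h : 0 ≤ PySem.Chars.find cs sub) :
    PySem.Chars.find (c :: cs) sub = PySem.Chars.find cs sub + 1 := by
  obtain ⟨hpre, hmin⟩ := PySem.Chars.find_spec h
  have := pvFind_eq_of (c :: cs) sub ((PySem.Chars.find cs sub).toNat + 1)
    (by simpa using hpre)
    (by
      intro i hi
      cases i with
      | zero => simpa using hnp
      | succ j =>
        intro hj
        exact hmin j (by omega) (by simpa using hj))
  rw [this]
  omega

-- find of the single character '&' is the length of the '&'-free prefix
theorem pvFindAmp (d : List Char) : PySem.Chars.find d ['&']
    = if '&' ∈ d then ((d.takeWhile (· ≠ '&')).length : Int) else -1 := by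
  induction d with
  | nil =>
    rw [if_neg (by simp), PySem.Chars.find_eq_neg_one_iff, pvSingletonInfix]
    simp
  | cons c cs ih =>
    by_cases hc : c = '&'
    · subst hc
      rw [if_pos (by simp), pvFind_cons_of_prefix _ _ _ (by simp)]
      simp
    · have hnp : ¬ (['&'] : List Char) <+: c :: cs := by
        intro h
        exact hc (List.cons_prefix_cons.mp h).1.symm
      by_cases hm : '&' ∈ cs
      · rw [if_pos (by simp [hm])]
        have h0 : 0 ≤ PySem.Chars.find cs ['&'] := by
          rw [ih, if_pos hm]
          exact Int.natCast_nonneg _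
        rw [pvFind_cons_succ _ _ _ hnp h0, ih, if_pos hm]
        rw [show List.takeWhile (fun x => decide (x ≠ '&')) (c :: cs)
              = c :: List.takeWhile (fun x => decide (x ≠ '&')) cs by
            simp [List.takeWhile_cons, hc]]
        simp only [List.length_cons]
        push_cast
        ring
      · rw [if_neg (by
          intro h
          rcases List.mem_cons.mp h with h1 | h1
          · exact hc h1.symm
          · exact hm h1)]
        exact pvFind_cons_neg _ _ _ hnp (by rw [ih, if_neg hm])

-- canonical form of the find-based computation: it computes the hash field
theorem pvCanon (cs : List Char) :
    (if PySem.Chars.find cs pvMagnet = -1 then none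
     else some ((List.drop ((PySem.Chars.find cs pvMagnet).toNat + 12) cs).takeWhile (· ≠ '&')))
    = pvHashField cs := by
  induction cs with
  | nil =>
    rw [if_pos (by rw [PySem.Chars.find_eq_neg_one_iff]; simp [pvMagnet_ne_nil])]
    rfl
  | cons c cs ih =>
    by_cases hp : pvMagnet <+: c :: cs
    · have hhf : pvHashField (c :: cs)
          = some ((List.drop 12 (c :: cs)).takeWhile (· ≠ '&')) := by
        rw [pvHashField, if_pos (List.isPrefixOf_iff_prefix.mpr (pvMark_eq ▸ hp))]
      rw [hhf, pvFind_cons_of_prefix _ _ _ hp,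
        if_neg (show ¬ (0 : Int) = -1 by norm_num)]
      norm_num
    · have hhf : pvHashField (c :: cs) = pvHashField cs := by
        rw [pvHashField, if_neg (fun hco => hp (pvMark_eq ▸ List.isPrefixOf_iff_prefix.mp hco))]
      rw [hhf]
      by_cases hf : PySem.Chars.find cs pvMagnet = -1
      · rw [pvFind_cons_neg _ _ _ hp hf, if_pos rfl, ← ih, if_pos hf]
      · have h0 : 0 ≤ PySem.Chars.find cs pvMagnet := by
          have := PySem.Chars.neg_one_le_find (s := cs) (sub := pvMagnet)
          omega
        rw [pvFind_cons_succ _ _ _ hp h0,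
          if_neg (show ¬ PySem.Chars.find cs pvMagnet + 1 = -1 by omega),
          ← ih, if_neg hf]
        have harg : (PySem.Chars.find cs pvMagnet + 1).toNat + 12
            = ((PySem.Chars.find cs pvMagnet).toNat + 12) + 1 := by omega
        rw [harg, List.drop_succ_cons]

-- D_ in terms of the hash field
theorem pvD_iff (s : String) : D_extract_hash_from_magnet_py s ↔
    ∃ r, pvHashField s.toList = some r ∧ pvMagnet <:+: r := by
  unfold D_extract_hash_from_magnet_py
  rw [pvLit_eq]
  constructor
  · rintro ⟨h1, h2⟩
    have hf : ¬ PySem.Chars.find s.toList pvMagnet = -1 :=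
      (PySem.Chars.find_ne_neg_one_iff s.toList pvMagnet).mpr
        ((PySem.Chars.isIn_iff_infix _ _).mp h1)
    refine ⟨_, ?_, (PySem.Chars.isIn_iff_infix _ _).mp h2⟩
    rw [← pvCanon, if_neg hf]
  · rintro ⟨r, hr, hinf⟩
    have hf : ¬ PySem.Chars.find s.toList pvMagnet = -1 := by
      intro h
      rw [← pvCanon, if_pos h] at hr
      cases hr
    rw [← pvCanon, if_neg hf] at hr
    injection hr with hr
    constructor
    · rw [PySem.Chars.isIn_iff_infix]
      have h1 : pvMagnet <:+: (s.toList.drop ((PySem.Chars.find s.toList pvMagnet).toNat + 12)).takeWhile (· ≠ '&') := hr ▸ hinf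
      exact h1.trans ((List.takeWhile_prefix _).isInfix.trans (List.drop_suffix _ s.toList).isInfix)
    · rw [PySem.Chars.isIn_iff_infix]
      exact hr ▸ hinf

-- a prefix whose characters all satisfy p is a prefix of the takeWhile
theorem pvPrefixTakeWhile (p : Char → Bool) :
    ∀ (sub l : List Char), sub <+: l → (∀ a ∈ sub, p a = true) → sub <+: l.takeWhile p := by
  intro sub
  induction sub with
  | nil => intro l _ _; exact List.nil_prefix
  | cons a sub' ih =>
    intro l h hall
    obtain ⟨t, rfl⟩ := h
    rw [List.cons_append, List.takeWhile_cons, if_pos (hall a List.mem_cons_self)]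
    refine List.cons_prefix_cons.mpr ⟨rfl, ?_⟩
    exact ih (sub' ++ t) (List.prefix_append _ _) (fun x hx => hall x (List.mem_cons_of_mem _ hx))

theorem pvMagnet_len : pvMagnet.length = 12 := by decide
theorem pvMagnet_no_amp : ∀ a ∈ pvMagnet, (decide (a ≠ '&')) = true := by
  rw [pvMagnet_eq]
  intro a ha
  fin_cases ha <;> decide

-- A's one-part capture versus the full hash field
theorem pvCaptureField (x : List Char) :
    (¬ pvMagnet <:+: x.takeWhile (· ≠ '&') → pvBCapture x = x.takeWhile (· ≠ '&')) ∧
    (pvMagnet <:+: x.takeWhile (· ≠ '&') →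
      (pvBCapture x).length + 12 ≤ (x.takeWhile (· ≠ '&')).length) := by
  induction x with
  | nil =>
    refine ⟨fun _ => rfl, fun h => absurd h ?_⟩
    simp [pvMagnet_ne_nil]
  | cons c cs ih =>
    by_cases hc : c = '&'
    · subst hc
      rw [show ('&' :: cs).takeWhile (· ≠ '&') = [] by simp [List.takeWhile_cons]]
      exact ⟨fun _ => by rw [pvBCapture, if_pos (by simp)],
             fun h => absurd h (by simp [pvMagnet_ne_nil])⟩
    · have htw : (c :: cs).takeWhile (· ≠ '&') = c :: cs.takeWhile (· ≠ '&') := by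
        simp [List.takeWhile_cons, hc]
      by_cases hsw : PySem.Chars.startswith (c :: cs) pvMagnet = true
      · have hpre := (pvStartswith_iff _).mp hsw
        have hcap : pvBCapture (c :: cs) = [] := by
          rw [pvBCapture, if_pos (by simp [hsw])]
        have hpt : pvMagnet <+: (c :: cs).takeWhile (· ≠ '&') :=
          pvPrefixTakeWhile _ pvMagnet (c :: cs) hpre pvMagnet_no_amp
        refine ⟨fun hni => absurd hpt.isInfix hni, fun _ => ?_⟩
        rw [hcap]
        have := hpt.length_le
        rw [pvMagnet_len] at this
        simpa using this
      · have hcap : pvBCapture (c :: cs) = c :: pvBCapture cs := by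
          rw [pvBCapture, if_neg (by simp [hc, hsw])]
        have hiff : pvMagnet <:+: (c :: cs.takeWhile (· ≠ '&')) ↔ pvMagnet <:+: cs.takeWhile (· ≠ '&') := by
          constructor
          · intro h
            rcases List.infix_cons_iff.mp h with h1 | h1
            · exfalso
              have hcc : pvMagnet <+: c :: cs :=
                h1.trans (List.cons_prefix_cons.mpr ⟨rfl, List.takeWhile_prefix _⟩)
              exact hsw ((pvStartswith_iff _).mpr hcc)
            · exact h1
          · intro h
            exact h.trans (List.suffix_cons c _).isInfix
        constructor
        · intro hni
          rw [htw] at hni ⊢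
          rw [hcap, ih.1 (fun hx => hni (hiff.mpr hx))]
        · intro hi
          rw [htw] at hi ⊢
          rw [hcap]
          have := ih.2 (hiff.mp hi)
          simp only [List.length_cons]
          omega

-- A's scan versus the hash field
theorem pvScanField (cs : List Char) :
    (pvHashField cs = none → pvBScan cs = none) ∧
    (∀ r, pvHashField cs = some r →
      (¬ pvMagnet <:+: r → pvBScan cs = some (PySem.Chars.lower r)) ∧
      (pvMagnet <:+: r → ∃ v, pvBScan cs = some (PySem.Chars.lower v) ∧ v.length + 12 ≤ r.length)) := by
  induction cs with
  | nil =>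
    constructor
    · intro _; rfl
    · intro r hr
      exfalso
      simp [pvHashField] at hr
  | cons c cs ih =>
    by_cases hp : pvMagnet <+: c :: cs
    · have hsw : PySem.Chars.startswith (c :: cs) pvMagnet = true := (pvStartswith_iff _).mpr hp
      have hhf : pvHashField (c :: cs) = some ((List.drop 12 (c :: cs)).takeWhile (· ≠ '&')) := by
        rw [pvHashField, if_pos (List.isPrefixOf_iff_prefix.mpr (pvMark_eq ▸ hp))]
      have hbs : pvBScan (c :: cs) = some (PySem.Chars.lower (pvBCapture (List.drop 12 (c :: cs)))) := by
        rw [pvBScan, if_pos hsw, pvMagnet_len]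
      refine ⟨fun h => ?_, fun r hr => ?_⟩
      · rw [hhf] at h; cases h
      rw [hhf] at hr
      injection hr with hr
      obtain ⟨h1, h2⟩ := pvCaptureField (List.drop 12 (c :: cs))
      constructor
      · intro hni
        rw [hbs, h1 (hr ▸ hni), hr]
      · intro hi
        exact ⟨pvBCapture (List.drop 12 (c :: cs)), hbs, hr ▸ h2 (hr ▸ hi)⟩
    · have hsw : ¬ PySem.Chars.startswith (c :: cs) pvMagnet = true :=
        fun h => hp ((pvStartswith_iff _).mp h)
      have hhf : pvHashField (c :: cs) = pvHashField cs := by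
        rw [pvHashField, if_neg (fun hco => hp (pvMark_eq ▸ List.isPrefixOf_iff_prefix.mp hco))]
      have hbs : pvBScan (c :: cs) = pvBScan cs := by
        rw [pvBScan, if_neg hsw]
      rw [hhf, hbs]
      exact ih

-- B's port computes (lower of) the hash field
theorem pvAltEq (s : String) :
    extract_hash_from_magnet_py_alt s
      = (pvHashField s.toList).map (fun r => String.ofList (PySem.Chars.lower r)) := by
  by_cases hf : PySem.Chars.find s.toList pvMagnet = -1
  · simp only [extract_hash_from_magnet_py_alt, pvLit_eq]
    rw [if_pos hf, ← pvCanon, if_pos hf]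
    rfl
  · have h0 : 0 ≤ PySem.Chars.find s.toList pvMagnet := by
      have := PySem.Chars.neg_one_le_find (s := s.toList) (sub := pvMagnet)
      omega
    obtain ⟨hpre, _⟩ := PySem.Chars.find_spec h0
    have hklen : (PySem.Chars.find s.toList pvMagnet).toNat + 12 ≤ s.toList.length := by
      have h1 := hpre.length_le
      rw [pvMagnet_len, List.length_drop] at h1
      omega
    set k0 := (PySem.Chars.find s.toList pvMagnet).toNat with hk0
    have hcast : PySem.Chars.find s.toList pvMagnet + (pvMagnet.length : Int)
        = (((k0 + 12 : Nat)) : Int) := by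
      rw [pvMagnet_len]
      push_cast
      omega
    have hff := PySem.Chars.findFrom_natCast s.toList ['&'] (k0 + 12) hklen
    simp only [extract_hash_from_magnet_py_alt, pvLit_eq]
    rw [if_neg hf, hcast, hff, ← pvCanon, if_neg hf, ← hk0]
    set d := s.toList.drop (k0 + 12) with hd
    set t := d.takeWhile (· ≠ '&') with ht
    by_cases hm : '&' ∈ d
    · have hamp : PySem.Chars.find d ['&'] = (t.length : Int) := by
        rw [pvFindAmp, if_pos hm]
      rw [hamp,
        if_neg (show ¬ ((t.length : Nat) : Int) = -1 by omega),
        if_neg (show ¬ (((k0 + 12 : Nat)) : Int) + ((t.length : Nat) : Int) = -1 by push_cast; omega)]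
      have hsum : (((k0 + 12 : Nat)) : Int) + ((t.length : Nat) : Int)
          = (((k0 + 12 + t.length : Nat)) : Int) := by push_cast; ring
      rw [hsum, PySem.List.slice_natCast]
      have htake : d.take ((k0 + 12 + t.length) - (k0 + 12)) = t := by
        rw [show (k0 + 12 + t.length) - (k0 + 12) = t.length by omega, ht]
        exact (List.prefix_iff_eq_take.mp (List.takeWhile_prefix _)).symm
      rw [htake]
      rfl
    · have hamp : PySem.Chars.find d ['&'] = -1 := by
        rw [pvFindAmp, if_neg hm]
      rw [hamp, if_pos rfl, if_pos rfl,
        show (s.toList.length : Int) = ((s.toList.length : Nat) : Int) from rfl,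
        PySem.List.slice_natCast]
      have htake : d.take (s.toList.length - (k0 + 12)) = d := by
        apply List.take_of_length_le
        rw [hd, List.length_drop]
      have htww : t = d :=
        List.takeWhile_eq_self_iff.mpr (fun a ha => by
          simp only [decide_eq_true_eq]
          intro hx
          exact hm (hx ▸ ha))
      rw [htake, ← htww]
      rfl

theorem pvAEq (s : String) :
    extract_hash_from_magnet_py s = (pvBScan s.toList).map String.ofList := by
  unfold extract_hash_from_magnet_py
  rw [pvSplit?_amp]
  dsimp only
  rw [pvMain]

theorem pvLowerLen (l : List Char) : (PySem.Chars.lower l).length = l.length := by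
  simp [PySem.Chars.lower]

-- ===== VERDICT (by name: the statement is the Claim_ definition above) =====
theorem extract_hash_from_magnet_py_spec : Claim_unchanged_extract_hash_from_magnet_py := by
  intro s _ hD
  cases hr : pvHashField s.toList with
  | none =>
    rw [pvAEq, (pvScanField s.toList).1 hr, pvAltEq, hr]
    rfl
  | some r =>
    have hni : ¬ pvMagnet <:+: r := fun hx => hD ((pvD_iff s).mpr ⟨r, hr, hx⟩)
    rw [pvAEq, ((pvScanField s.toList).2 r hr).1 hni, pvAltEq, hr]
    rfl

theorem extract_hash_from_magnet_py_changed : Claim_changed_extract_hash_from_magnet_py := by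
  unfold Claim_changed_extract_hash_from_magnet_py; decide

theorem extract_hash_from_magnet_py_tight : Claim_exact_extract_hash_from_magnet_py := by
  unfold Claim_exact_extract_hash_from_magnet_py
  intro s _ hD heq
  obtain ⟨r, hr, hinf⟩ := (pvD_iff s).mp hD
  obtain ⟨v, hscan, hlenv⟩ := ((pvScanField s.toList).2 r hr).2 hinf
  rw [pvAEq, hscan, pvAltEq, hr] at heq
  simp only [Option.map_some, Option.some.injEq] at heq
  have hv : PySem.Chars.lower v = PySem.Chars.lower r := by
    have := congrArg String.toList heq
    simpa using this
  have hlen := congrArg List.length hv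
  rw [pvLowerLen, pvLowerLen] at hlen
  omega
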